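-- pv_equiv track=rewrite | github.com/BringerXu/RezumeProjects | python高级/q1helper/q1solution.py | who
-- ===== SOURCE A (Python) =====
-- def who(db : {str:{(str,int)}}, job: str, min_skill : int) -> [(str,int)]:
--     assert type(min_skill)==int and 0<=min_skill<=5
--     result = []
--     for k in db:
--         for l in db[k]:
--             if l[0] == job and l[1] >= min_skill:
--                result.append((k,l[1]))
--     return sorted(result,key=lambda s:(-s[1],s[0]))
-- ===== SOURCE B (Python) =====
-- def who(db, job, min_skill):
--     assert type(min_skill)==int and 0<=min_skill<=5
--     buckets = {}
--     for k in db: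
--         for l in db[k]:
--             if l[0] == job and l[1] >= min_skill:
--                 buckets[l[1]] = buckets.get(l[1], []) + [k]
--     out = []
--     for lvl in sorted(buckets, reverse=True):
--         for name in sorted(buckets[lvl]):
--             out.append((name, lvl))
--     return out
-- ===== Notes on version B (the rewrite author's own statement) =====
-- stated objective: alternative
-- what changed: Instead of collecting a flat list and sorting it once with the composite key (-skill, name), B groups matching names into per-skill buckets in a dict during the scan, then walks the distinct skill values in descending order emitting each bucket's names in ascending order.
import Mathlib
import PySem

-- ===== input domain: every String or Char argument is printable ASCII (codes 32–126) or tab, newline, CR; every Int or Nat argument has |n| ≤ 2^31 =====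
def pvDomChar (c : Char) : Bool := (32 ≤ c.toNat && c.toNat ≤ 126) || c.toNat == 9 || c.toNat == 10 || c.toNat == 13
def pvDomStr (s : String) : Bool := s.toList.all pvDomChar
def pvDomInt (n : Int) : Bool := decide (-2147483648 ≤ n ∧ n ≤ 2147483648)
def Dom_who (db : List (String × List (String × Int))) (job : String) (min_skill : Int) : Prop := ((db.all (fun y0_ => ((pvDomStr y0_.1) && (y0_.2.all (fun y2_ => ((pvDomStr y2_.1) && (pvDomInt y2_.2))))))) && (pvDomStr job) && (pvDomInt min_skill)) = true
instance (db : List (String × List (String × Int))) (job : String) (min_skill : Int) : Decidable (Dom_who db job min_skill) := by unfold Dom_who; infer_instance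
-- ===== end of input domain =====

-- B groups matching names into per-skill dict buckets, then emits distinct skills descending with each
-- bucket's names ascending, instead of A's single sort of the flat match list by the composite key (-skill, name).

-- ===== PORT A =====
def who (db : List (String × List (String × Int))) (job : String) (min_skill : Int) : List (String × Int) :=
  let result := db.foldl (fun res k =>
    k.2.foldl (fun res l =>
      if l.1 == job && decide (l.2 ≥ min_skill) then res ++ [(k.1, l.2)] else res) res) []
  PySem.List.sorted2 result (fun s => -s.2) (fun s => s.1)

-- ===== PORT B =====
def who_alt (db : List (String × List (String × Int))) (job : String) (min_skill : Int) : List (String × Int) :=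
  let buckets : PySem.Dict Int (List String) := db.foldl (fun d k =>
    k.2.foldl (fun d l =>
      if l.1 == job && decide (l.2 ≥ min_skill) then d.modify l.2 [] (· ++ [k.1]) else d) d)
    PySem.Dict.empty
  (PySem.List.sorted buckets.keys (fun x => x) true).foldl (fun out lvl =>
    out ++ (PySem.List.sorted (buckets.getD lvl []) (fun x => x)).map (fun n => (n, lvl))) []

-- ===== PRECONDITION & SPEC =====
-- A's assert raises AssertionError unless 0 ≤ min_skill ≤ 5; Pre_ excludes exactly those raising inputs.
def Pre_who (db : List (String × List (String × Int))) (job : String) (min_skill : Int) : Prop :=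
  0 ≤ min_skill ∧ min_skill ≤ 5
instance (db : List (String × List (String × Int))) (job : String) (min_skill : Int) : Decidable (Pre_who db job min_skill) := by unfold Pre_who; infer_instance

def pvWitness_who : (List (String × List (String × Int))) × String × Int :=
  ([("alice", [("dev", 3), ("ops", 1)]), ("bob", [("dev", 5)])], "dev", 2)

def Spec_who (db : List (String × List (String × Int))) (job : String) (min_skill : Int) (out : List (String × Int)) : Prop := out = who_alt db job min_skill
instance (db : List (String × List (String × Int))) (job : String) (min_skill : Int) (out : List (String × Int)) : Decidable (Spec_who db job min_skill out) := by unfold Spec_who; infer_instance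

-- ===== CLAIM (what is proved, stated in full; the proofs are below) =====
def Claim_equal_who : Prop := ∀ (db : List (String × List (String × Int))) (job : String) (min_skill : Int), Dom_who db job min_skill → Pre_who db job min_skill → Spec_who db job min_skill (who db job min_skill)

-- ===== LEMMAS AND PROOFS =====

-- the flat list of (skill, name) matches, in scan order
def pvP (db : List (String × List (String × Int))) (job : String) (min_skill : Int) : List (Int × String) :=
  db.flatMap (fun k => ((k.2.filter (fun l => l.1 == job && decide (l.2 ≥ min_skill))).map (fun l => (l.2, k.1))))

-- A's composite sort key, as a lexicographic pair
def pvKey (p : String × Int) : Lex (Int × String) := toLex (-p.2, p.1)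

theorem pvKey_inj : Function.Injective pvKey := by
  intro p q h
  have h' : (-p.2, p.1) = (-q.2, q.1) := h
  have h1 := congrArg Prod.fst h'
  have h2 := congrArg Prod.snd h'
  simp at h1 h2
  exact Prod.ext h2 h1

-- A normal form: who = sorted of the swapped match list by pvKey
theorem before_eq (a b : String × Int) :
    (decide (-a.2 < -b.2) || (!decide (-b.2 < -a.2) && decide (a.1 < b.1)))
      = decide (pvKey a < pvKey b) := by
  apply Bool.eq_iff_iff.mpr
  simp only [Bool.or_eq_true, Bool.and_eq_true, Bool.not_eq_eq_eq_not, Bool.not_true,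
    decide_eq_true_iff, decide_eq_false_iff_not, pvKey, Prod.Lex.lt_iff, ofLex_toLex]
  constructor
  · rintro (h | ⟨h1, h2⟩)
    · exact Or.inl h
    · rcases lt_trichotomy (-a.2 : Int) (-b.2) with h' | h' | h'
      · exact Or.inl h'
      · exact Or.inr ⟨h', h2⟩
      · exact absurd h' h1
  · rintro (h | ⟨h1, h2⟩)
    · exact Or.inl h
    · exact Or.inr ⟨by omega, h2⟩

theorem sorted2_eq (xs : List (String × Int)) :
    PySem.List.sorted2 xs (fun s => -s.2) (fun s => s.1) false
      = PySem.List.sorted xs pvKey false := by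
  show List.foldl (fun acc x => PySem.List.insertBy
      (fun a b => decide (-a.2 < -b.2) || (!decide (-b.2 < -a.2) && decide (a.1 < b.1))) x acc) [] xs
    = List.foldl (fun acc x => PySem.List.insertBy (fun a b => decide (pvKey a < pvKey b)) x acc) [] xs
  simp only [before_eq]

theorem who_eq_sorted (db : List (String × List (String × Int))) (job : String) (min_skill : Int) :
    who db job min_skill =
      PySem.List.sorted ((pvP db job min_skill).map Prod.swap) pvKey false := by
  unfold who
  rw [sorted2_eq]
  congr 1
  simp only [PySem.List.foldl_append_if, PySem.List.foldl_append_eq_flatMap, List.nil_append,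
    pvP, List.map_flatMap, List.map_map]
  rfl

-- B normal form
theorem buckets_eq (db : List (String × List (String × Int))) (job : String) (min_skill : Int)
    (d : PySem.Dict Int (List String)) :
    db.foldl (fun d k => k.2.foldl (fun d l =>
        if l.1 == job && decide (l.2 ≥ min_skill) then d.modify l.2 [] (· ++ [k.1]) else d) d) d
      = (pvP db job min_skill).foldl (fun d p => d.modify p.1 [] (· ++ [p.2])) d := by
  induction db generalizing d with
  | nil => rfl
  | cons k rest ih =>
    simp only [List.foldl_cons, pvP, List.flatMap_cons, List.foldl_append] at *
    rw [ih]
    congr 1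
    rw [PySem.List.foldl_if_eq_foldl_filter
      (fun (l : String × Int) => l.1 == job && decide (l.2 ≥ min_skill))
      (fun (d : PySem.Dict Int (List String)) (l : String × Int) => d.modify l.2 [] (· ++ [k.1]))]
    rw [List.foldl_map]

theorem who_alt_eq (db : List (String × List (String × Int))) (job : String) (min_skill : Int) :
    who_alt db job min_skill =
      (PySem.List.sorted (PySem.Set.ofList ((pvP db job min_skill).map (·.1))) (fun x => x) true).flatMap
        (fun c => (PySem.List.sorted (((pvP db job min_skill).filter (fun p => p.1 == c)).map (·.2)) (fun x => x) false).map
          (fun n => (n, c))) := by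
  unfold who_alt
  rw [buckets_eq]
  rw [PySem.List.foldl_append_eq_flatMap]
  simp only [List.nil_append]
  have hk : ((pvP db job min_skill).foldl (fun d p => d.modify p.1 [] (· ++ [p.2]))
      PySem.Dict.empty).keys = PySem.Set.ofList ((pvP db job min_skill).map (·.1)) := by
    rw [PySem.Dict.keys_foldl_modify_key (pvP db job min_skill) (·.1) [] (fun _ p => (· ++ [p.2]))]
    simp [PySem.Set.update_nil_left]
  rw [hk]
  simp only [PySem.Dict.getD_foldl_modify_append, PySem.Dict.getD_empty, List.nil_append]

-- partitioning a pair list by its (distinct, covering) first components is a permutation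
theorem partition_perm (ks : List Int) (P : List (Int × String))
    (hnd : ks.Nodup) (hcov : ∀ p ∈ P, p.1 ∈ ks) :
    (ks.flatMap (fun c => P.filter (fun p => p.1 == c))).Perm P := by
  induction ks generalizing P with
  | nil =>
    cases P with
    | nil => simp
    | cons p P => exact absurd (hcov p (List.mem_cons_self)) (List.not_mem_nil)
  | cons c ks ih =>
    rw [List.flatMap_cons]
    have hcns : c ∉ ks := (List.nodup_cons.mp hnd).1
    have hrest : ks.flatMap (fun c' => P.filter (fun p => p.1 == c'))
        = ks.flatMap (fun c' => (P.filter (fun p => !(p.1 == c))).filter (fun p => p.1 == c')) := by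
      apply List.flatMap_congr
      intro c' hc'
      rw [List.filter_filter]
      apply (List.filter_congr ?_).symm
      intro p _
      by_cases hp : p.1 = c'
      · have hne : ¬ p.1 = c := fun h => hcns (by rw [h.symm.trans hp]; exact hc')
        have hcc : ¬ c' = c := fun h => hne (hp.trans h)
        simp [hp, hcc]
      · simp [hp]
    rw [hrest]
    have hsub : ∀ p ∈ P.filter (fun p => !(p.1 == c)), p.1 ∈ ks := by
      intro p hp
      have hmem := List.mem_of_mem_filter hp
      have hne : ¬ p.1 = c := by simpa using List.of_mem_filter hp
      rcases List.mem_cons.mp (hcov p hmem) with h | h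
      · exact absurd h hne
      · exact h
    have ihp := ih _ (List.nodup_cons.mp hnd).2 hsub
    exact (List.Perm.append_left _ ihp).trans (List.filter_append_perm _ P)

theorem who_alt_perm (db : List (String × List (String × Int))) (job : String) (min_skill : Int) :
    (who_alt db job min_skill).Perm ((pvP db job min_skill).map Prod.swap) := by
  rw [who_alt_eq]
  have h1 : ∀ c : Int, ((PySem.List.sorted (((pvP db job min_skill).filter (fun p => p.1 == c)).map (·.2)) (fun x => x) false).map (fun n => (n, c))).Perm
      (((pvP db job min_skill).filter (fun p => p.1 == c)).map Prod.swap) := by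
    intro c
    refine ((PySem.List.sorted_perm (((pvP db job min_skill).filter (fun p => p.1 == c)).map (·.2)) (fun x => x) false).map (fun n => (n, c))).trans ?_
    rw [List.map_map]
    apply List.Perm.of_eq
    apply List.map_congr_left
    intro p hp
    have hc : p.1 = c := by simpa using List.of_mem_filter hp
    simp [Prod.swap, hc]
  have h2 := List.Perm.flatMap
      (PySem.List.sorted_perm (PySem.Set.ofList ((pvP db job min_skill).map (·.1))) (fun x => x) true)
      (fun c _ => h1 c)
  refine h2.trans ?_
  rw [← List.map_flatMap]
  refine List.Perm.map Prod.swap ?_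
  exact partition_perm _ _ (PySem.Set.nodup_ofList _)
    (fun p hp => (PySem.Set.mem_ofList _ _).mpr (List.mem_map_of_mem hp))

theorem who_alt_pairwise (db : List (String × List (String × Int))) (job : String) (min_skill : Int) :
    (who_alt db job min_skill).Pairwise (fun a b => pvKey a ≤ pvKey b) := by
  rw [who_alt_eq]
  apply List.pairwise_flatMap.mpr
  constructor
  · intro c _
    apply List.pairwise_map.mpr
    refine (PySem.List.sorted_pairwise (((pvP db job min_skill).filter (fun p => p.1 == c)).map (·.2)) (fun x => x)).imp ?_
    intro a b h
    show pvKey (a, c) ≤ pvKey (b, c)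
    simp [pvKey, Prod.Lex.le_iff, h]
  · have hge := PySem.List.sorted_pairwise_rev (PySem.Set.ofList ((pvP db job min_skill).map (·.1))) (fun x => x)
    have hnd : (PySem.List.sorted (PySem.Set.ofList ((pvP db job min_skill).map (·.1))) (fun x => x) true).Nodup :=
      ((PySem.List.sorted_perm _ _ _).nodup_iff).mpr (PySem.Set.nodup_ofList _)
    refine (hge.and hnd).imp ?_
    intro c c' h x hx y hy
    obtain ⟨n, -, rfl⟩ := List.mem_map.mp hx
    obtain ⟨n', -, rfl⟩ := List.mem_map.mp hy
    show pvKey (n, c) ≤ pvKey (n', c')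
    have hlt : (-c : Int) < -c' := by
      rcases h with ⟨hle, hne⟩
      have hle' : c' ≤ c := hle
      omega
    apply le_of_lt
    rw [pvKey, pvKey, Prod.Lex.lt_iff]
    simp only [ofLex_toLex]
    exact Or.inl hlt

-- ===== VERDICT (by name: the statement is the Claim_ definition above) =====
theorem who_spec : Claim_equal_who := by
  intro db job min_skill _ _
  unfold Spec_who
  rw [who_eq_sorted]
  refine PySem.List.eq_of_perm_of_pairwise_le_of_injective pvKey pvKey_inj ?_ ?_ ?_
  · exact (PySem.List.sorted_perm _ _ _).trans (who_alt_perm db job min_skill).symm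
  · exact PySem.List.sorted_pairwise _ _
  · exact who_alt_pairwise db job min_skill
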